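-- pv_equiv track=rewrite | github.com/EsosaOrumwese/fraud-detection-system | src/fraud_detection/decision_log_audit/storage.py | _render_sql
-- ===== SOURCE A (Python) =====
-- def _render_sql(sql: str, backend: str) -> str:
--     if backend == "postgres":
--         rendered = sql
--         for idx in range(1, 21):
--             rendered = rendered.replace(f"{{p{idx}}}", f"${idx}")
--         return rendered
--     rendered = sql
--     for idx in range(1, 21):
--         rendered = rendered.replace(f"{{p{idx}}}", "?")
--     return rendered
-- ===== SOURCE B (Python) =====
-- import re
--
-- _PLACEHOLDER = re.compile(r"\{p(\d+)\}")
-- _VALID = {str(i) for i in range(1, 21)}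
--
--
-- def _render_sql(sql: str, backend: str) -> str:
--     def repl(m):
--         g = m.group(1)
--         if g not in _VALID:
--             return m.group(0)
--         return f"${g}" if backend == "postgres" else "?"
--
--     return _PLACEHOLDER.sub(repl, sql)
-- ===== Notes on version B (the rewrite author's own statement) =====
-- stated objective: idiomatic
-- what changed: Replaces the two fixed 20-iteration str.replace loops (each rescanning the whole string) with a single compiled-regex re.sub pass whose callback substitutes $n or ? only for captured digit strings in {'1',...,'20'} and returns the match unchanged otherwise (so {p0}, {p21}, {p01} are left alone exactly as A leaves them).
import Mathlib
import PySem

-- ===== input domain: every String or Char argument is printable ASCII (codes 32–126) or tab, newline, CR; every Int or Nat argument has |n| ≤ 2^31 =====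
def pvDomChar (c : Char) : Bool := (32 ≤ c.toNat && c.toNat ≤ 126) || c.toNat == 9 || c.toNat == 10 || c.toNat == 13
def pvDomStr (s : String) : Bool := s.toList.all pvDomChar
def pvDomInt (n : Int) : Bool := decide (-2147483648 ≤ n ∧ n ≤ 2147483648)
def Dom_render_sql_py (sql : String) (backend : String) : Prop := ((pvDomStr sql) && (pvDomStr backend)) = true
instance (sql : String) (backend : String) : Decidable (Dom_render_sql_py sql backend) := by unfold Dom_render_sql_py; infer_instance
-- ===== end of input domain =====

-- B replaces A's two fixed 20-iteration replace-loops by one regex-style left-to-right scan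
-- (a single pass over the string); equivalence of the two renderings is proved for all inputs.


-- ===== PORT A =====
-- literal transliteration: for idx in range(1, 21): rendered = rendered.replace("{p"+str(idx)+"}", …)
def render_sql_py (sql : String) (backend : String) : String :=
  if backend == "postgres" then
    (PySem.List.pyRange 1 21 1).foldl
      (fun rendered idx =>
        PySem.Str.replace rendered ("{p" ++ PySem.Int.toStr idx ++ "}") ("$" ++ PySem.Int.toStr idx))
      sql
  else
    (PySem.List.pyRange 1 21 1).foldl
      (fun rendered idx =>
        PySem.Str.replace rendered ("{p" ++ PySem.Int.toStr idx ++ "}") "?")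
      sql

-- ===== PORT B =====
-- Source B's _VALID = {str(i) for i in range(1, 21)}, kept as the digit strings (as char lists)
def pvValid : List (List Char) :=
  (PySem.List.pyRange 1 21 1).map (fun i => (PySem.Int.toStr i).toList)

-- hand port of re.sub with pattern r"\{p(\d+)\}" and Source B's callback: one left-to-right scan;
-- at a match, substitute iff the captured digit string is in _VALID, else emit the match verbatim;
-- on a failed match attempt the search resumes at the next character (exact for the ASCII domain:
-- Char.isDigit is Python's \d on ASCII).
def pvSubAux (pg : Bool) : List Char → List Char
  | [] => []
  | '{' :: 'p' :: rest =>
      let ds := rest.takeWhile Char.isDigit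
      let dw := rest.dropWhile Char.isDigit
      if ds ≠ [] ∧ dw.head? = some '}' then
        (if ds ∈ pvValid then (if pg then '$' :: ds else ['?'])
         else '{' :: 'p' :: ds ++ ['}']) ++ pvSubAux pg dw.tail
      else '{' :: pvSubAux pg ('p' :: rest)
  | c :: rest => c :: pvSubAux pg rest
termination_by l => l.length
decreasing_by
  all_goals simp only [List.length_cons]
  all_goals try omega
  all_goals
    (have h1 : (rest.dropWhile Char.isDigit).length ≤ rest.length := List.length_dropWhile_le _ _;
     have h2 : (rest.dropWhile Char.isDigit).tail.length = (rest.dropWhile Char.isDigit).length - 1 :=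
       List.length_tail;
     omega)

def render_sql_py_alt (sql : String) (backend : String) : String :=
  String.ofList (pvSubAux (backend == "postgres") sql.toList)

-- ===== PRECONDITION & SPEC =====
def Spec_render_sql_py (sql : String) (backend : String) (out : String) : Prop := out = render_sql_py_alt sql backend
instance (sql : String) (backend : String) (out : String) : Decidable (Spec_render_sql_py sql backend out) := by unfold Spec_render_sql_py; infer_instance

-- ===== CLAIM (what is proved, stated in full; the proofs are below) =====
def Claim_equal_render_sql_py : Prop := ∀ (sql : String) (backend : String), Dom_render_sql_py sql backend → Spec_render_sql_py sql backend (render_sql_py sql backend)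

-- ===== LEMMAS AND PROOFS =====

-- structural-recursion form of Python's str.replace (PySem.Chars.replace) for a nonempty pattern
def repF (old new : List Char) : List Char → List Char
  | [] => []
  | c :: t =>
      if old.isPrefixOf (c :: t) then new ++ repF old new (t.drop (old.length - 1))
      else c :: repF old new t
termination_by l => l.length
decreasing_by
  · simp only [List.length_cons]
    have := List.length_drop (l := t) (i := old.length - 1)
    omega
  · simp

theorem repF_nil (old new : List Char) : repF old new [] = [] := by simp [repF]

theorem replace_go_eq (old new : List Char) (hold : old ≠ []) :
    ∀ (fuel : Nat) (l acc : List Char), l.length ≤ fuel →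
      PySem.Chars.replace.go old new fuel l acc = acc.reverse ++ repF old new l := by
  intro fuel
  induction fuel with
  | zero =>
      intro l acc hl
      have : l = [] := List.eq_nil_of_length_eq_zero (Nat.le_zero.mp hl)
      subst this
      simp [PySem.Chars.replace.go, repF_nil]
  | succ n ih =>
      intro l acc hl
      cases l with
      | nil => simp [PySem.Chars.replace.go, repF_nil]
      | cons c t =>
          rw [PySem.Chars.replace.go]
          by_cases hp : old.isPrefixOf (c :: t) = true
          · rw [if_pos hp]
            obtain ⟨o0, o', rfl⟩ : ∃ o0 o', old = o0 :: o' := by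
              cases old with
              | nil => exact absurd rfl hold
              | cons a b => exact ⟨a, b, rfl⟩
            have hdrop : (c :: t).drop (o0 :: o').length = t.drop ((o0 :: o').length - 1) := by
              simp
            rw [hdrop, ih _ _ (by
              simp only [List.length_drop, List.length_cons] at hl ⊢
              omega)]
            rw [repF]
            rw [if_pos hp]
            simp
          · rw [if_neg hp]
            rw [ih t (c :: acc) (by simp only [List.length_cons] at hl; omega)]
            rw [repF, if_neg hp]
            simp

theorem replace_eq_repF (s old new : List Char) (hold : old ≠ []) :
    PySem.Chars.replace s old new = repF old new s := by
  rw [PySem.Chars.replace]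
  rw [if_neg (by simpa [List.isEmpty_iff] using hold)]
  simpa using replace_go_eq old new hold s.length s [] le_rfl

theorem str_replace_toList (s old new : String) (hold : old.toList ≠ []) :
    (PySem.Str.replace s old new).toList = repF old.toList new.toList s.toList := by
  rw [PySem.Str.toList_replace, replace_eq_repF _ _ _ hold]

-- a prefix of a list determines its first character
theorem isPrefixOf_head {x : Char} {xs l : List Char}
    (h : (x :: xs).isPrefixOf l = true) : ∃ t, l = x :: t := by
  cases l with
  | nil => simp [List.isPrefixOf] at h
  | cons c t =>
      simp only [List.isPrefixOf_iff_prefix] at h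
      obtain ⟨u, hu⟩ := h
      cases hu
      exact ⟨_, rfl⟩

-- replace skips over a block in which the pattern starts nowhere
theorem repF_append_skip (old new : List Char) :
    ∀ (a u : List Char), (∀ i, i < a.length → ¬ old.isPrefixOf ((a ++ u).drop i) = true) →
      repF old new (a ++ u) = a ++ repF old new u := by
  intro a
  induction a with
  | nil => intro u _; simp
  | cons c a' ih =>
      intro u h
      have h0 : ¬ old.isPrefixOf (c :: (a' ++ u)) = true := by
        have := h 0 (by simp)
        simpa using this
      rw [List.cons_append, repF, if_neg h0, ih u (fun i hi => by
        have := h (i + 1) (by simp; omega)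
        simpa using this)]
      simp

-- replace fires at an exact occurrence of the pattern at the front
theorem repF_append_self (old new u : List Char) (hold : old ≠ []) :
    repF old new (old ++ u) = new ++ repF old new u := by
  obtain ⟨o0, o', rfl⟩ : ∃ o0 o', old = o0 :: o' := by
    cases old with
    | nil => exact absurd rfl hold
    | cons a b => exact ⟨a, b, rfl⟩
  rw [List.cons_append, repF, if_pos (by
    simp only [List.isPrefixOf_iff_prefix]
    exact (List.prefix_append _ _))]
  congr 1
  have : ((o0 :: o').length - 1) = o'.length := by simp
  rw [this]
  simp

-- replacement text begins with a character absent from w, so a prefix w of the output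
-- was already a prefix of the input
theorem repF_prefix_pres (old : List Char) (h0 : Char) (new' : List Char) :
    ∀ (n : Nat) (w v : List Char), v.length ≤ n → (∀ c ∈ w, c ≠ h0) →
      w.isPrefixOf (repF old (h0 :: new') v) = true → w.isPrefixOf v = true := by
  intro n
  induction n with
  | zero =>
      intro w v hv hw hpre
      have : v = [] := List.eq_nil_of_length_eq_zero (Nat.le_zero.mp hv)
      subst this
      simpa [repF_nil] using hpre
  | succ m ih =>
      intro w v hv hw hpre
      cases v with
      | nil => simpa [repF_nil] using hpre
      | cons c t =>
          rw [repF] at hpre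
          by_cases hp : old.isPrefixOf (c :: t) = true
          · rw [if_pos hp] at hpre
            cases w with
            | nil => simp [List.isPrefixOf]
            | cons w0 w' =>
                obtain ⟨t', ht'⟩ := isPrefixOf_head hpre
                simp only [List.cons_append] at ht'
                have hw0 : w0 = h0 := by
                  have := congrArg (fun l => l.head?) ht'
                  simpa using this.symm
                exact absurd hw0 (hw w0 (by simp))
          · rw [if_neg hp] at hpre
            cases w with
            | nil => simp [List.isPrefixOf]
            | cons w0 w' =>
                simp only [List.isPrefixOf] at hpre ⊢
                obtain ⟨he, hrest⟩ := Bool.and_eq_true_iff.mp hpre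
                refine Bool.and_eq_true_iff.mpr ⟨he, ?_⟩
                exact ih w' t (by simp only [List.length_cons] at hv; omega)
                  (fun c hc => hw c (by simp [hc])) hrest

-- the placeholder built from a digit string d
def pvPat (d : List Char) : List Char := '{' :: 'p' :: d ++ ['}']

def pvRep (pg : Bool) (d : List Char) : List Char := if pg then '$' :: d else ['?']

-- A's loop over a list of digit strings, replace-by-replace
def applyList (pg : Bool) (qs : List (List Char)) (l : List Char) : List Char :=
  qs.foldl (fun s d => repF (pvPat d) (pvRep pg d) s) l

abbrev pvGood (d : List Char) : Prop := d ≠ [] ∧ ∀ c ∈ d, c.isDigit = true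

-- two maximal digit runs followed by '}' agree iff equal
theorem digit_run_eq :
    ∀ (x y v : List Char), (∀ c ∈ x, c.isDigit = true) → (∀ c ∈ y, c.isDigit = true) →
      (x ++ ['}']).isPrefixOf (y ++ '}' :: v) = true → x = y := by
  intro x
  induction x with
  | nil =>
      intro y v _ hy hpre
      cases y with
      | nil => rfl
      | cons b y' =>
          have hb : '}' = b := by simpa using hpre
          have := hy b (by simp)
          rw [← hb] at this
          simp [Char.isDigit] at this
  | cons a x' ih =>
      intro y v hx hy hpre
      cases y with
      | nil =>
          have ha : a = '}' := by simpa using (And.left (by simpa using hpre))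
          have := hx a (by simp)
          rw [ha] at this
          simp [Char.isDigit] at this
      | cons b y' =>
          simp only [List.cons_append, List.isPrefixOf] at hpre
          obtain ⟨he, hrest⟩ := Bool.and_eq_true_iff.mp hpre
          have hab : a = b := by simpa using he
          subst hab
          rw [ih y' v (fun c hc => hx c (by simp [hc])) (fun c hc => hy c (by simp [hc])) hrest]

-- a placeholder pattern matching at the front of an emitted placeholder block forces equal digits
theorem pat_prefix_digits (d e v : List Char) (hd : ∀ c ∈ d, c.isDigit = true)
    (he : ∀ c ∈ e, c.isDigit = true)
    (h : (pvPat d).isPrefixOf ('{' :: 'p' :: (e ++ '}' :: v)) = true) : d = e := by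
  simp only [pvPat, List.isPrefixOf] at h
  obtain ⟨_, h⟩ := Bool.and_eq_true_iff.mp h
  obtain ⟨_, h⟩ := Bool.and_eq_true_iff.mp h
  exact digit_run_eq d e v hd he h

theorem isDigit_ne_lbrace {c : Char} (h : c.isDigit = true) : c ≠ '{' := by
  intro hc; rw [hc] at h; simp [Char.isDigit] at h

-- characters of the block '{'::'p'::e++['}'] at positions ≥ 1 are never '{'
theorem block_no_inner_start (d e u : List Char) (he : ∀ c ∈ e, c.isDigit = true) :
    ∀ i, 1 ≤ i → i < (pvPat e).length →
      ¬ (pvPat d).isPrefixOf ((pvPat e ++ u).drop i) = true := by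
  intro i h1 h2 hpre
  obtain ⟨t, ht⟩ := isPrefixOf_head hpre
  have hlen : i < (pvPat e ++ u).length := by
    rw [List.length_append]; omega
  have hhead : ((pvPat e ++ u).drop i).head? = some ((pvPat e ++ u)[i]) := by
    rw [List.head?_drop]
    simp [hlen]
  rw [ht] at hhead
  simp only [List.head?_cons, Option.some.injEq] at hhead
  have hgetblock : (pvPat e ++ u)[i] = (pvPat e)[i]'h2 :=
    List.getElem_append_left h2
  obtain ⟨j, rfl⟩ : ∃ j, i = j + 1 := ⟨i - 1, by omega⟩
  have hj : j < ('p' :: e ++ ['}']).length := by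
    simp only [pvPat, List.length_cons] at h2 ⊢
    simpa using Nat.lt_of_succ_lt_succ h2
  have hval : (pvPat e)[j + 1]'h2 = ('p' :: e ++ ['}'])[j]'hj := by
    simp [pvPat]
  have hmem : ('p' :: e ++ ['}'])[j]'hj ∈ 'p' :: e ++ ['}'] := List.getElem_mem _
  have hne : ('p' :: e ++ ['}'])[j]'hj ≠ '{' := by
    rcases List.mem_cons.mp hmem with h' | h'
    · rw [h']; simp
    · rcases List.mem_append.mp h' with h'' | h''
      · exact isDigit_ne_lbrace (he _ h'')
      · rw [List.mem_singleton.mp h'']; simp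
  apply hne
  rw [← hval, ← hgetblock, ← hhead]

-- every character of a replacement block differs from '{'
theorem rep_chars_ne_lbrace (pg : Bool) (e : List Char) (he : ∀ c ∈ e, c.isDigit = true) :
    ∀ c ∈ pvRep pg e, c ≠ '{' := by
  intro c hc
  cases pg with
  | true =>
      simp [pvRep] at hc
      rcases hc with hc | hc
      · rw [hc]; simp
      · exact isDigit_ne_lbrace (he c hc)
  | false =>
      simp [pvRep] at hc
      rw [hc]; simp

-- fold: the whole fold distributes over a block where no pattern of qs can start
theorem applyList_skip_block (pg : Bool) (e : List Char)
    (he : ∀ c ∈ e, c.isDigit = true) :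
    ∀ (qs : List (List Char)), (∀ d ∈ qs, pvGood d ∧ d ≠ e) →
    ∀ u, applyList pg qs (pvPat e ++ u) = pvPat e ++ applyList pg qs u := by
  intro qs
  induction qs with
  | nil => intro _ u; simp [applyList]
  | cons q qs' ih =>
      intro hqs u
      have hq := hqs q (by simp)
      have hstep : repF (pvPat q) (pvRep pg q) (pvPat e ++ u) =
          pvPat e ++ repF (pvPat q) (pvRep pg q) u := by
        apply repF_append_skip
        intro i hi
        rcases Nat.eq_zero_or_pos i with rfl | hpos
        · simp only [List.drop_zero]
          intro hpre
          exact hq.2 (pat_prefix_digits q e u hq.1.2 he (by simpa [pvPat] using hpre))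
        · exact block_no_inner_start q e u he i hpos hi
      simp only [applyList, List.foldl_cons] at ih ⊢
      rw [hstep]
      exact ih (fun d hd => hqs d (by simp [hd])) _

-- fold: the whole fold distributes over an emitted replacement block (starts with '$' or '?')
theorem applyList_skip_rep (pg : Bool) (e : List Char)
    (he : ∀ c ∈ e, c.isDigit = true) :
    ∀ (qs : List (List Char)) (u : List Char),
      applyList pg qs (pvRep pg e ++ u) = pvRep pg e ++ applyList pg qs u := by
  intro qs
  induction qs with
  | nil => intro u; simp [applyList]
  | cons q qs' ih =>
      intro u
      have hstep : repF (pvPat q) (pvRep pg q) (pvRep pg e ++ u) =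
          pvRep pg e ++ repF (pvPat q) (pvRep pg q) u := by
        apply repF_append_skip
        intro i hi hpre
        obtain ⟨t, ht⟩ := isPrefixOf_head (by simpa [pvPat] using hpre)
        have hlen : i < (pvRep pg e ++ u).length := by
          rw [List.length_append]; omega
        have hhead : ((pvRep pg e ++ u).drop i).head? = some ((pvRep pg e ++ u)[i]) := by
          rw [List.head?_drop]; simp [hlen]
        rw [ht] at hhead
        simp only [List.head?_cons, Option.some.injEq] at hhead
        have hgetblock : (pvRep pg e ++ u)[i] = (pvRep pg e)[i]'hi :=
          List.getElem_append_left hi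
        have hmem : (pvRep pg e)[i]'hi ∈ pvRep pg e := List.getElem_mem _
        apply rep_chars_ne_lbrace pg e he _ hmem
        rw [← hgetblock, ← hhead]
      simp only [applyList, List.foldl_cons] at ih ⊢
      rw [hstep]
      exact ih _

-- fold: one plain character passes through when no pattern of qs starts here, and stays
-- unmatchable because replacements begin with '$'/'?'
theorem applyList_cons (pg : Bool) (c : Char) :
    ∀ (qs : List (List Char)) (t : List Char), (∀ d ∈ qs, pvGood d) →
      (∀ d ∈ qs, ¬ (pvPat d).isPrefixOf (c :: t) = true) →
      applyList pg qs (c :: t) = c :: applyList pg qs t := by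
  intro qs
  induction qs with
  | nil => intro t _ _; simp [applyList]
  | cons q qs' ih =>
      intro t hqs hnm
      have hq := hqs q (by simp)
      have hstep : repF (pvPat q) (pvRep pg q) (c :: t) =
          c :: repF (pvPat q) (pvRep pg q) t := by
        rw [repF, if_neg (hnm q (by simp))]
      simp only [applyList, List.foldl_cons] at ih ⊢
      rw [hstep]
      refine ih _ (fun d hd => hqs d (by simp [hd])) (fun d hd hpre => ?_)
      -- if pattern d matched c :: (repF … t), its tail 'p'::d++['}'] is a prefix of the
      -- replaced t made only of non-replacement-head chars, hence was a prefix of t already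
      have h2 : '{' = c ∧ ('p' :: (d ++ ['}'])) <+: repF (pvPat q) (pvRep pg q) t := by
        simpa [pvPat] using hpre
      have htail : ('p' :: d ++ ['}']).isPrefixOf (repF (pvPat q) (pvRep pg q) t) = true := by
        rw [List.isPrefixOf_iff_prefix]
        simpa using h2.2
      have hd' := hqs d (by simp [hd])
      have hw : ∀ ch ∈ ('p' :: d ++ ['}']), ch ≠ (pvRep pg q).head! := by
        intro ch hch
        have hch' : ch = 'p' ∨ ch ∈ d ∨ ch = '}' := by simpa using hch
        have hhd : (pvRep pg q).head! = (if pg then '$' else '?') := by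
          cases pg <;> simp [pvRep]
        rw [hhd]
        rcases hch' with rfl | hch' | rfl
        · cases pg <;> decide
        · have hdig := hd'.2 ch hch'
          have hne2 : ch ≠ '$' ∧ ch ≠ '?' := by
            constructor <;> (intro hc2; rw [hc2] at hdig; simp [Char.isDigit] at hdig)
          cases pg
          · simpa using hne2.2
          · simpa using hne2.1
        · cases pg <;> decide
      have hrep : pvRep pg q = (pvRep pg q).head! :: (pvRep pg q).tail := by
        cases pg <;> simp [pvRep]
      have hpret : ('p' :: d ++ ['}']).isPrefixOf t = true := by
        refine repF_prefix_pres (pvPat q) (pvRep pg q).head! (pvRep pg q).tail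
          t.length _ t le_rfl hw ?_
        rw [← hrep]
        exact htail
      apply hnm d (by simp [hd])
      rw [← h2.1, List.isPrefixOf_iff_prefix]
      have hpret' := (List.isPrefixOf_iff_prefix).mp hpret
      simp only [pvPat, List.cons_append] at hpret' ⊢
      exact List.cons_prefix_cons.mpr ⟨rfl, hpret'⟩

theorem applyList_nil (pg : Bool) (qs : List (List Char)) : applyList pg qs [] = [] := by
  induction qs with
  | nil => simp [applyList]
  | cons q qs' ih => simpa [applyList, repF_nil] using ih

-- fold over qs₁ ++ e :: qs₂ at an exact occurrence of pvPat e in front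
theorem applyList_hit (pg : Bool) (qs₁ qs₂ : List (List Char)) (e : List Char)
    (he : pvGood e)
    (h₁ : ∀ d ∈ qs₁, pvGood d ∧ d ≠ e)
    (u : List Char) :
    applyList pg (qs₁ ++ e :: qs₂) (pvPat e ++ u) =
      pvRep pg e ++ applyList pg (qs₁ ++ e :: qs₂) u := by
  have hfold : ∀ (l : List Char),
      applyList pg (qs₁ ++ e :: qs₂) l =
        applyList pg qs₂ (repF (pvPat e) (pvRep pg e) (applyList pg qs₁ l)) := by
    intro l
    simp [applyList, List.foldl_append]
  rw [hfold, hfold]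
  rw [applyList_skip_block pg e he.2 qs₁ h₁]
  rw [repF_append_self _ _ _ (by simp [pvPat])]
  rw [applyList_skip_rep pg e he.2]

-- decomposing rest into its maximal digit run
theorem takeWhile_digits_append (e v : List Char) (he : ∀ c ∈ e, c.isDigit = true) :
    (e ++ '}' :: v).takeWhile Char.isDigit = e ∧
    (e ++ '}' :: v).dropWhile Char.isDigit = '}' :: v := by
  induction e with
  | nil => simp [List.takeWhile, List.dropWhile, Char.isDigit]
  | cons a e' ih =>
      have ha := he a (by simp)
      obtain ⟨ih1, ih2⟩ := ih (fun c hc => he c (by simp [hc]))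
      constructor
      · simp [List.takeWhile, ha, ih1]
      · simp [List.dropWhile, ha, ih2]

set_option maxRecDepth 100000 in
theorem pvValid_lit : pvValid =
    [['1'], ['2'], ['3'], ['4'], ['5'], ['6'], ['7'], ['8'], ['9'], ['1','0'],
     ['1','1'], ['1','2'], ['1','3'], ['1','4'], ['1','5'], ['1','6'], ['1','7'],
     ['1','8'], ['1','9'], ['2','0']] := by decide

theorem pvValid_good : ∀ d ∈ pvValid, pvGood d := by
  intro d hd
  rw [pvValid_lit] at hd
  simp only [List.mem_cons, List.not_mem_nil, or_false] at hd
  rcases hd with rfl|rfl|rfl|rfl|rfl|rfl|rfl|rfl|rfl|rfl|rfl|rfl|rfl|rfl|rfl|rfl|rfl|rfl|rfl|rfl <;>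
    exact ⟨by simp, by simp⟩

theorem pvValid_nodup : pvValid.Nodup := by
  rw [pvValid_lit]
  simp

-- a pattern pvPat d prefixes '{'::'p'::rest only when rest is d, '}' and a tail;
-- then d is rest's maximal digit run
theorem pat_prefix_structure (d rest : List Char) (hd : pvGood d)
    (h : (pvPat d).isPrefixOf ('{' :: 'p' :: rest) = true) :
    ∃ v, rest = d ++ '}' :: v ∧ rest.takeWhile Char.isDigit = d ∧
      rest.dropWhile Char.isDigit = '}' :: v := by
  rw [List.isPrefixOf_iff_prefix] at h
  simp only [pvPat, List.cons_append, List.cons_prefix_cons] at h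
  obtain ⟨-, -, h⟩ := h
  obtain ⟨v, hv⟩ := h
  have hrest : rest = d ++ '}' :: v := by
    rw [← hv]; simp
  obtain ⟨h1, h2⟩ := takeWhile_digits_append d v hd.2
  exact ⟨v, hrest, by rw [hrest, h1], by rw [hrest, h2]⟩

-- a pattern can only start at '{' followed by 'p'
theorem pat_prefix_shape (d : List Char) (c : Char) (t : List Char)
    (h : (pvPat d).isPrefixOf (c :: t) = true) :
    c = '{' ∧ ∃ rest, t = 'p' :: rest ∧ (pvPat d).isPrefixOf ('{' :: 'p' :: rest) = true := by
  rw [List.isPrefixOf_iff_prefix] at h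
  simp only [pvPat, List.cons_append, List.cons_prefix_cons] at h
  obtain ⟨hc, h⟩ := h
  rcases t with - | ⟨c2, rest⟩
  · exact absurd h (by simp)
  · simp only [List.cons_prefix_cons] at h
    refine ⟨hc.symm, rest, by rw [h.1], ?_⟩
    rw [List.isPrefixOf_iff_prefix]
    simp only [pvPat, List.cons_append, List.cons_prefix_cons]
    simpa using h.2

-- B's scan emits a plain character whenever the position cannot start a match
theorem pvSubAux_cons_plain (pg : Bool) (c : Char) (t : List Char)
    (h : ¬ (c = '{' ∧ ∃ rest, t = 'p' :: rest)) :
    pvSubAux pg (c :: t) = c :: pvSubAux pg t := by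
  rcases t with - | ⟨c2, rest⟩
  · rw [pvSubAux.eq_def]
    split
    · rename_i heq; simp at heq
    · rename_i heq; simp at heq
    · rename_i heq
      injection heq with h1 h2
      subst h1
      subst h2
      rfl
  · rw [pvSubAux.eq_def]
    split
    · rename_i heq; simp at heq
    · rename_i heq
      exfalso
      injection heq with h1 h2
      injection h2 with h3 h4
      exact h ⟨h1, rest, by rw [h3]⟩
    · rename_i heq
      injection heq with h1 h2
      subst h1
      subst h2
      rfl

-- main induction: A's 20-fold replace equals B's single scan
theorem main_eq (pg : Bool) : ∀ (n : Nat) (l : List Char), l.length ≤ n →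
    applyList pg pvValid l = pvSubAux pg l := by
  intro n
  induction n with
  | zero =>
      intro l hl
      have : l = [] := List.eq_nil_of_length_eq_zero (Nat.le_zero.mp hl)
      subst this
      rw [applyList_nil]
      simp [pvSubAux]
  | succ m ih =>
      intro l hl
      rcases hL : l with - | ⟨c, t⟩
      · rw [applyList_nil]; simp [pvSubAux]
      · subst hL
        by_cases hshape : c = '{' ∧ ∃ rest, t = 'p' :: rest
        · obtain ⟨rfl, rest, rfl⟩ := hshape
          set ds := rest.takeWhile Char.isDigit with hds
          set dw := rest.dropWhile Char.isDigit with hdw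
          have hdsdig : ∀ ch ∈ ds, ch.isDigit = true := fun ch hch =>
            List.mem_takeWhile_imp hch
          by_cases hmatch : ds ≠ [] ∧ dw.head? = some '}'
          · -- a regex match "{p"++ds++"}" at the front
            obtain ⟨hne, hhd⟩ := hmatch
            have hdwcons : dw = '}' :: dw.tail := by
              rcases hdw2 : dw with - | ⟨x, xs⟩
              · rw [hdw2] at hhd; simp at hhd
              · rw [hdw2] at hhd; simp at hhd; simp [hhd]
            have hrest : rest = ds ++ '}' :: dw.tail := by
              conv_lhs => rw [← List.takeWhile_append_dropWhile (p := Char.isDigit) (l := rest)]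
              rw [← hds, ← hdw, ← hdwcons]
            have hlshape : '{' :: 'p' :: rest = pvPat ds ++ dw.tail := by
              rw [hrest]; simp [pvPat]
            have hlen : dw.tail.length ≤ m := by
              have h1 : ('{' :: 'p' :: rest).length = 2 + rest.length := by simp; omega
              have h2 : rest.length = ds.length + 1 + dw.tail.length := by
                rw [hrest]; simp; omega
              have h3 : 1 ≤ ds.length := by
                rcases ds with - | _
                · exact absurd rfl hne
                · simp
              simp only [List.length_cons] at hl
              omega
            have hgoodds : pvGood ds := ⟨hne, hdsdig⟩
            have hsub : pvSubAux pg ('{' :: 'p' :: rest) =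
                (if ds ∈ pvValid then (if pg then '$' :: ds else ['?'])
                 else '{' :: 'p' :: ds ++ ['}']) ++ pvSubAux pg dw.tail := by
              rw [pvSubAux]
              rw [if_pos ⟨hne, hhd⟩]
            by_cases hv : ds ∈ pvValid
            · -- valid placeholder: it gets replaced
              obtain ⟨qs₁, qs₂, hsplit⟩ := List.append_of_mem hv
              have hnodup : pvValid.Nodup := pvValid_nodup
              rw [hsplit] at hnodup
              have hnotmem : ds ∉ qs₁ := by
                obtain ⟨-, -, hdisj⟩ := List.nodup_append.mp hnodup
                exact fun hmem => hdisj ds hmem ds (by simp) rfl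
              have h₁ : ∀ d ∈ qs₁, pvGood d ∧ d ≠ ds := by
                intro d hdm
                refine ⟨pvValid_good d (by rw [hsplit]; simp [hdm]), ?_⟩
                intro heq; rw [heq] at hdm; exact hnotmem hdm
              rw [hsub, if_pos hv]
              conv_lhs => rw [hlshape, hsplit]
              rw [applyList_hit pg qs₁ qs₂ ds hgoodds h₁, ← hsplit, ih dw.tail hlen]
              cases pg <;> simp [pvRep]
            · -- well-shaped but out-of-range placeholder: both sides leave it verbatim
              have hall : ∀ d ∈ pvValid, pvGood d ∧ d ≠ ds := by
                intro d hdm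
                refine ⟨pvValid_good d hdm, ?_⟩
                intro heq; rw [← heq] at hv; exact hv hdm
              rw [hsub, if_neg hv]
              conv_lhs => rw [hlshape]
              rw [applyList_skip_block pg ds hdsdig pvValid hall, ih dw.tail hlen]
              simp [pvPat]
          · -- no regex match here: one character passes through on both sides
            have hnm : ∀ d ∈ pvValid, ¬ (pvPat d).isPrefixOf ('{' :: 'p' :: rest) = true := by
              intro d hdm hpre
              obtain ⟨v, hrest, h1, h2⟩ :=
                pat_prefix_structure d rest (pvValid_good d hdm) hpre
              apply hmatch
              constructor
              · rw [← hds] at h1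
                rw [h1]
                exact (pvValid_good d hdm).1
              · rw [← hdw] at h2
                rw [h2]
                rfl
            rw [applyList_cons pg '{' pvValid ('p' :: rest) pvValid_good hnm]
            have hlen : ('p' :: rest).length ≤ m := by
              simp only [List.length_cons] at hl ⊢; omega
            rw [ih _ hlen]
            conv_rhs => rw [pvSubAux]
            rw [if_neg hmatch]
        · -- head position cannot start a match at all
          have hnm : ∀ d ∈ pvValid, ¬ (pvPat d).isPrefixOf (c :: t) = true := by
            intro d hdm hpre
            obtain ⟨hc, rest, hrest, -⟩ := pat_prefix_shape d c t hpre
            exact hshape ⟨hc, rest, hrest⟩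
          rw [applyList_cons pg c pvValid t pvValid_good hnm]
          have hlen : t.length ≤ m := by simp only [List.length_cons] at hl; omega
          rw [ih _ hlen]
          rw [pvSubAux_cons_plain pg c t hshape]

-- pyRange 1 21 1 as a literal list
theorem pyRange_lit : PySem.List.pyRange 1 21 1 =
    [1, 2, 3, 4, 5, 6, 7, 8, 9, 10, 11, 12, 13, 14, 15, 16, 17, 18, 19, 20] := by rfl

-- A's port, on character lists
theorem toList_A (sql backend : String) :
    (render_sql_py sql backend).toList =
      applyList (backend == "postgres") pvValid sql.toList := by
  unfold render_sql_py
  cases hb : backend == "postgres"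
  · rw [if_neg (by simp [hb])]
    rw [pyRange_lit]
    simp only [List.foldl_cons, List.foldl_nil]
    repeat rw [str_replace_toList _ _ _ (by decide)]
    rfl
  · rw [if_pos (by simp [hb])]
    rw [pyRange_lit]
    simp only [List.foldl_cons, List.foldl_nil]
    repeat rw [str_replace_toList _ _ _ (by decide)]
    rfl

-- ===== VERDICT (by name: the statement is the Claim_ definition above) =====
theorem render_sql_py_spec : Claim_equal_render_sql_py := by
  intro sql backend _
  unfold Spec_render_sql_py
  apply String.toList_inj.mp
  rw [toList_A]
  unfold render_sql_py_alt
  rw [String.toList_ofList]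
  exact main_eq (backend == "postgres") sql.toList.length sql.toList le_rfl
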